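-- pv_equiv track=rewrite | github.com/LynxTWO/mix-marriage-offline | src/mmo/core/render_run_audio.py | _normalize_plugin_id_alias
-- ===== SOURCE A (Python) =====
-- def _normalize_plugin_id_alias(value: str) -> str:
--     cleaned = [
--         (char.lower() if char.isalnum() else "_")
--         for char in value
--     ]
--     collapsed = "".join(cleaned).strip("_")
--     while "__" in collapsed:
--         collapsed = collapsed.replace("__", "_")
--     return collapsed
-- ===== SOURCE B (Python) =====
-- def _normalize_plugin_id_alias(value: str) -> str:
--     tokens = []
--     buf = []
--     for char in value:
--         if char.isalnum():
--             buf.append(char.lower())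
--         elif buf:
--             tokens.append("".join(buf))
--             buf = []
--     if buf:
--         tokens.append("".join(buf))
--     return "_".join(tokens)
-- ===== Notes on version B (the rewrite author's own statement) =====
-- stated objective: simpler
-- what changed: Replaces A's pipeline of masking every non-alphanumeric character to an underscore, stripping edge underscores and repeatedly collapsing doubled underscores, by a single pass that buffers lowercased alphanumeric runs and joins the non-empty tokens with one separator, so edge and duplicate separators never arise.
import Mathlib
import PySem

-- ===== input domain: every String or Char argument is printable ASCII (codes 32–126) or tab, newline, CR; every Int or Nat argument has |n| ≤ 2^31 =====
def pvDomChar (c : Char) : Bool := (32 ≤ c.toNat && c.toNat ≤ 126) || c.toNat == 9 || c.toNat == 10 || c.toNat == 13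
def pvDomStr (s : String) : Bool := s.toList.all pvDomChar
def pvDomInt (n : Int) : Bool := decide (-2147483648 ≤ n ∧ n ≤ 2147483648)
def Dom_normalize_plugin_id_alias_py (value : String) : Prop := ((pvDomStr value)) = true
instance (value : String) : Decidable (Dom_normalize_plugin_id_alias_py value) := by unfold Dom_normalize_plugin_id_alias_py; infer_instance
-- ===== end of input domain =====

-- B replaces A's map-to-underscores / strip('_') / repeated replace('__','_') pipeline by a
-- single pass that buffers lowercased alphanumeric runs and joins the non-empty tokens with '_'.

-- ===== PORT A =====
-- the comprehension body: char.lower() if char.isalnum() else "_"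
def pvStep (c : Char) : Char := if PySem.Chars.isalnum c then PySem.Chars.lowerChar c else '_'

-- structural description of one replace("__","_") pass; needed only to justify termination of
-- the while-loop below (and reused by the proofs)
def pvRep : List Char → List Char
  | [] => []
  | [c] => [c]
  | a :: b :: t => if a = '_' ∧ b = '_' then '_' :: pvRep t else a :: pvRep (b :: t)

theorem pv_go_eq (fuel : Nat) : ∀ (l acc : List Char), l.length ≤ fuel →
    PySem.Chars.replace.go ['_','_'] ['_'] fuel l acc = acc.reverse ++ pvRep l := by
  induction fuel with
  | zero =>
    intro l acc h
    have hl : l = [] := by cases l <;> simp_all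
    subst hl
    rw [PySem.Chars.replace.go.eq_1, pvRep]
  | succ f ih =>
    intro l acc h
    match l with
    | [] => rw [PySem.Chars.replace.go.eq_2 _ _ _ _ (by omega), pvRep]; simp
    | [c] =>
      rw [PySem.Chars.replace.go.eq_3]
      have hpre : (['_','_'] : List Char).isPrefixOf [c] = false := by
        by_cases hc : c = '_' <;> simp [hc, List.isPrefixOf]
      rw [hpre]
      simp only [Bool.false_eq_true, if_false]
      rw [ih [] (c :: acc) (by simp), pvRep, pvRep]
      simp
    | a :: b :: t =>
      rw [PySem.Chars.replace.go.eq_3]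
      by_cases hab : a = '_' ∧ b = '_'
      · obtain ⟨ha, hb⟩ := hab; subst ha; subst hb
        have hpre : (['_','_'] : List Char).isPrefixOf ('_' :: '_' :: t) = true := by
          simp [List.isPrefixOf]
        rw [hpre, if_pos rfl]
        rw [show (List.drop (['_','_'] : List Char).length ('_' :: '_' :: t)) = t from rfl]
        rw [ih t _ (by simp at h ⊢; omega)]
        rw [pvRep, if_pos ⟨rfl, rfl⟩]
        simp
      · have hpre : (['_','_'] : List Char).isPrefixOf (a :: b :: t) = false := by
          rcases (not_and_or.mp hab) with hx | hx <;> simp [List.isPrefixOf] <;> tauto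
        rw [hpre]
        simp only [Bool.false_eq_true, if_false]
        rw [ih (b :: t) (a :: acc) (by simp at h ⊢; omega)]
        rw [pvRep, if_neg hab]
        simp

theorem pv_replace_eq (s : List Char) :
    PySem.Chars.replace s ['_','_'] ['_'] = pvRep s := by
  rw [PySem.Chars.replace,
    if_neg (show ¬((['_','_'] : List Char).isEmpty = true) from by simp)]
  exact pv_go_eq s.length s [] le_rfl

theorem pvRep_length_le (l : List Char) : (pvRep l).length ≤ l.length := by
  induction l using pvRep.induct with
  | case1 => simp [pvRep]
  | case2 c => simp [pvRep]
  | case3 a b t hab ih => simp [pvRep, if_pos hab]; omega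
  | case4 a b t hab ih => simp [pvRep, if_neg hab] at ih ⊢; omega

theorem pvRep_length_lt (l : List Char) (h : ['_','_'] <:+: l) :
    (pvRep l).length < l.length := by
  induction l using pvRep.induct with
  | case1 => simp at h
  | case2 c => have := h.length_le; simp at this
  | case3 a b t hab ih =>
    obtain ⟨ha, hb⟩ := hab; subst ha; subst hb
    simp [pvRep]
    have := pvRep_length_le t
    omega
  | case4 a b t hab ih =>
    have h2 : ['_','_'] <:+: b :: t := by
      rcases List.infix_cons_iff.mp h with hx | hx
      · rcases List.cons_prefix_cons.mp hx with ⟨h1, h2⟩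
        rcases List.cons_prefix_cons.mp h2 with ⟨h3, _⟩
        exact absurd ⟨h1.symm, h3.symm⟩ hab
      · exact hx
    simp [pvRep, if_neg hab]
    have := ih h2
    simp at this
    omega

theorem pv_replace_lt (s : List Char) (h : PySem.Chars.isIn ['_','_'] s = true) :
    (PySem.Chars.replace s ['_','_'] ['_']).length < s.length := by
  rw [pv_replace_eq]
  exact pvRep_length_lt s ((PySem.Chars.isIn_iff_infix _ _).mp h)

-- the while-loop: while "__" in collapsed: collapsed = collapsed.replace("__","_")
def collapseLoopA (s : List Char) : List Char :=
  if h : PySem.Chars.isIn ['_','_'] s = true then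
    collapseLoopA (PySem.Chars.replace s ['_','_'] ['_'])
  else s
termination_by s.length
decreasing_by exact pv_replace_lt s h

def normalize_plugin_id_alias_py (value : String) : String :=
  let cleaned := value.toList.map pvStep
  let collapsed := PySem.Chars.stripChars cleaned ['_']
  String.mk (collapseLoopA collapsed)

-- ===== PORT B =====
def altLoop : List Char → List (List Char) → List Char → List (List Char) × List Char
  | [], toks, buf => (toks, buf)
  | c :: cs, toks, buf =>
    if PySem.Chars.isalnum c then altLoop cs toks (buf ++ [PySem.Chars.lowerChar c])
    else if buf ≠ [] then altLoop cs (toks ++ [buf]) []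
    else altLoop cs toks buf

def normalize_plugin_id_alias_py_alt (value : String) : String :=
  let p := altLoop value.toList [] []
  let toks := if p.2 ≠ [] then p.1 ++ [p.2] else p.1
  String.mk (PySem.Chars.join ['_'] toks)

-- ===== PRECONDITION & SPEC =====
def Spec_normalize_plugin_id_alias_py (value : String) (out : String) : Prop := out = normalize_plugin_id_alias_py_alt value
instance (value : String) (out : String) : Decidable (Spec_normalize_plugin_id_alias_py value out) := by unfold Spec_normalize_plugin_id_alias_py; infer_instance

-- ===== CLAIM (what is proved, stated in full; the proofs are below) =====
def Claim_equal_normalize_plugin_id_alias_py : Prop := ∀ (value : String), Dom_normalize_plugin_id_alias_py value → Spec_normalize_plugin_id_alias_py value (normalize_plugin_id_alias_py value)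

-- ===== LEMMAS AND PROOFS =====

-- run-collapse: the fixpoint of replace("__","_")
def pvDedup : List Char → List Char
  | [] => []
  | [c] => [c]
  | a :: b :: t => if a = '_' ∧ b = '_' then pvDedup (b :: t) else a :: pvDedup (b :: t)

-- 3-state normalizer on the masked list: 0 = start, 1 = inside a token, 2 = after a token
def pvNf : Nat → List Char → List Char
  | _, [] => []
  | st, c :: t =>
    if c = '_' then (if st = 0 then pvNf 0 t else pvNf 2 t)
    else (if st = 2 then '_' :: c :: pvNf 1 t else c :: pvNf 1 t)

-- strip("_") from the right only
def pvRstrip (l : List Char) : List Char :=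
  (List.dropWhile (fun c => (['_'] : List Char).contains c) l.reverse).reverse

theorem pvDedup_underscore_cons (x : List Char) :
    pvDedup ('_' :: x) = if x.head? = some '_' then pvDedup x else '_' :: pvDedup x := by
  match x with
  | [] => simp [pvDedup]
  | a :: t => by_cases ha : a = '_' <;> simp [pvDedup, ha]

theorem pvDedup_cons_ne (c : Char) (x : List Char) (hc : c ≠ '_') :
    pvDedup (c :: x) = c :: pvDedup x := by
  match x with
  | [] => simp [pvDedup]
  | a :: t => rw [pvDedup, if_neg (fun hh => hc hh.1)]

theorem pvRep_head (l : List Char) : (pvRep l).head? = l.head? := by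
  induction l using pvRep.induct with
  | case1 => rfl
  | case2 c => rfl
  | case3 a b t hab ih => obtain ⟨ha, hb⟩ := hab; subst ha; subst hb; simp [pvRep]
  | case4 a b t hab ih => simp [pvRep, if_neg hab]

theorem pvDedup_pvRep (l : List Char) : pvDedup (pvRep l) = pvDedup l := by
  induction l using pvRep.induct with
  | case1 => rfl
  | case2 c => rfl
  | case3 a b t hab ih =>
    obtain ⟨ha, hb⟩ := hab; subst ha; subst hb
    rw [pvRep, if_pos ⟨rfl, rfl⟩]
    rw [pvDedup_underscore_cons, pvRep_head]
    rw [show pvDedup ('_' :: '_' :: t) = pvDedup ('_' :: t) from by rw [pvDedup, if_pos ⟨rfl, rfl⟩]]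
    rw [pvDedup_underscore_cons, ih]
  | case4 a b t hab ih =>
    rw [pvRep, if_neg hab]
    by_cases ha : a = '_'
    · subst ha
      rw [pvDedup_underscore_cons, pvDedup_underscore_cons, pvRep_head, ih]
    · rw [pvDedup_cons_ne a _ ha, pvDedup_cons_ne a _ ha, ih]

theorem pvDedup_noInfix (l : List Char) (h : ¬ ['_','_'] <:+: l) : pvDedup l = l := by
  induction l using pvDedup.induct with
  | case1 => rfl
  | case2 c => rfl
  | case3 a b t hab ih =>
    obtain ⟨ha, hb⟩ := hab; subst ha; subst hb
    exact absurd (List.infix_cons_iff.mpr (Or.inl ⟨t, rfl⟩)) h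
  | case4 a b t hab ih =>
    rw [pvDedup, if_neg hab, ih (fun hx => h (List.infix_cons_iff.mpr (Or.inr hx)))]

theorem collapseLoopA_eq_dedup (l : List Char) : collapseLoopA l = pvDedup l := by
  induction l using collapseLoopA.induct with
  | case1 l h ih =>
    rw [collapseLoopA, dif_pos h, ih, pv_replace_eq, pvDedup_pvRep]
  | case2 l h =>
    rw [collapseLoopA, dif_neg h,
      pvDedup_noInfix l ((PySem.Chars.isIn_eq_false_iff _ _).mp (by simpa using h))]

theorem pvRstrip_cons (c : Char) (t : List Char) :
    pvRstrip (c :: t) = if c = '_' ∧ pvRstrip t = [] then [] else c :: pvRstrip t := by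
  unfold pvRstrip
  rw [show (c :: t).reverse = t.reverse ++ [c] from by simp]
  rw [List.dropWhile_append]
  by_cases he : (List.dropWhile (fun c => (['_'] : List Char).contains c) t.reverse) = []
  · simp only [he, List.isEmpty_nil, if_true]
    by_cases hc : c = '_' <;> simp [List.dropWhile, hc]
  · have : (List.dropWhile (fun c => (['_'] : List Char).contains c) t.reverse).isEmpty = false := by
      simpa [List.isEmpty_iff] using he
    simp only [this, Bool.false_eq_true, if_false]
    rw [if_neg (fun hh => he (by simpa [List.reverse_eq_nil_iff] using hh.2))]
    simp

theorem pvRstrip_head (l : List Char) (h : pvRstrip l ≠ []) : (pvRstrip l).head? = l.head? := by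
  match l with
  | [] => simp [pvRstrip] at h
  | c :: t =>
    rw [pvRstrip_cons] at h ⊢
    split_ifs at h ⊢ with hh
    · simp at h
    · simp

-- the normalizer, in states 1/2, vs run-collapse of the right-stripped list
theorem pvNf_inTok_after (l : List Char) :
    pvNf 1 l = pvDedup (pvRstrip l) ∧ pvNf 2 l = pvDedup (pvRstrip ('_' :: l)) := by
  induction l with
  | nil => constructor <;> simp [pvNf, pvRstrip, List.dropWhile, pvDedup]
  | cons c t ih =>
    obtain ⟨ih1, ih2⟩ := ih
    by_cases hc : c = '_'
    · subst hc
      constructor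
      · rw [pvNf]; simpa using ih2
      · rw [pvNf]
        simp only [if_pos rfl, show (2:Nat) ≠ 0 from by omega, if_neg]
        rw [ih2]
        have hr : pvRstrip ('_' :: '_' :: t) =
            if pvRstrip ('_' :: t) = [] then [] else '_' :: pvRstrip ('_' :: t) := by
          rw [pvRstrip_cons]
          by_cases he : pvRstrip ('_' :: t) = [] <;> simp [he]
        rw [hr]
        by_cases he : pvRstrip ('_' :: t) = []
        · simp [he]
        · rw [if_neg he, pvDedup_underscore_cons, pvRstrip_head _ he]
          simp
    · constructor
      · rw [pvNf]
        simp only [if_neg hc, show (1:Nat) ≠ 2 from by omega, if_neg]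
        rw [pvRstrip_cons]
        rw [if_neg (show ¬(c = '_' ∧ pvRstrip t = []) from fun hh => hc hh.1)]
        rw [pvDedup_cons_ne c _ hc, ih1]
        simp
      · rw [pvNf]
        simp only [if_neg hc, if_pos rfl]
        have h2 : pvRstrip (c :: t) = c :: pvRstrip t := by
          rw [pvRstrip_cons, if_neg (fun hh => hc hh.1)]
        have h1 : pvRstrip ('_' :: c :: t) = '_' :: c :: pvRstrip t := by
          rw [pvRstrip_cons, if_neg, h2]
          rintro ⟨-, hh⟩
          rw [h2] at hh
          simp at hh
        rw [h1, pvDedup_underscore_cons]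
        rw [pvDedup_cons_ne c _ hc, ih1]
        simp [hc]

theorem pvNf_start (l : List Char) :
    pvNf 0 l = pvNf 1 (List.dropWhile (fun c => (['_'] : List Char).contains c) l) := by
  induction l with
  | nil => rfl
  | cons c t ih =>
    by_cases hc : c = '_'
    · subst hc
      rw [pvNf, if_pos rfl, if_pos rfl, ih]
      simp [List.dropWhile]
    · rw [pvNf, if_neg hc]
      rw [List.dropWhile_cons_of_neg (by simpa using hc)]
      rw [pvNf, if_neg hc]
      simp

theorem pv_join_concat (ts : List (List Char)) (b : List Char) :
    PySem.Chars.join ['_'] (ts ++ [b]) =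
      PySem.Chars.join ['_'] ts ++ (if ts = [] then [] else ['_']) ++ b := by
  induction ts with
  | nil => simp [PySem.Chars.join, List.intercalate]
  | cons a ts ih =>
    match ts with
    | [] => simp [PySem.Chars.join, List.intercalate]
    | x :: ts' =>
      have h1 : ∀ (y : List Char) (ys : List (List Char)),
          PySem.Chars.join ['_'] (y :: x :: ys) = y ++ ['_'] ++ PySem.Chars.join ['_'] (x :: ys) :=
        fun y ys => by simp [PySem.Chars.join, List.intercalate, List.intersperse]
      rw [show (a :: x :: ts') ++ [b] = a :: x :: (ts' ++ [b]) from by simp, h1,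
        show x :: (ts' ++ [b]) = (x :: ts') ++ [b] from rfl, ih, h1]
      simp

theorem pvLower_ne (c : Char) (h : PySem.Chars.isalnum c = true) :
    PySem.Chars.lowerChar c ≠ '_' := by
  have chLe : ∀ {a b : Char}, a ≤ b → a.toNat ≤ b.toNat :=
    fun hab => UInt32.le_iff_toNat_le.mp (Char.le_def.mp hab)
  simp only [PySem.Chars.isalnum, PySem.Chars.isalpha, PySem.Chars.isdigit, PySem.Chars.isupper,
    PySem.Chars.islower, Bool.or_eq_true, Bool.and_eq_true, decide_eq_true_eq] at h
  unfold PySem.Chars.lowerChar PySem.Chars.isupper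
  split_ifs with hu
  · simp only [Bool.and_eq_true, decide_eq_true_eq] at hu
    have h1 := chLe hu.1
    have h2 := chLe hu.2
    have hA : ('A' : Char).toNat = 65 := rfl
    have hZ : ('Z' : Char).toNat = 90 := rfl
    intro hh
    have h95 : (Char.ofNat (c.toNat + 32)).toNat = 95 := by rw [hh]; rfl
    rw [Char.toNat_ofNat] at h95
    have hval : (c.toNat + 32).isValidChar := by constructor; omega
    rw [if_pos hval] at h95
    omega
  · simp only [Bool.and_eq_true, decide_eq_true_eq, not_and_or, not_le] at hu
    intro hh
    have h95 : c.toNat = 95 := by rw [show c = '_' from hh]; rfl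
    rcases h with (⟨h1, h2⟩ | ⟨h1, h2⟩) | ⟨h1, h2⟩ <;>
      first
      | (exact absurd (chLe h1) (by simp_all [show ('A':Char).toNat = 65 from rfl]))
      | (have := chLe h1; have := chLe h2; simp_all; omega)

theorem pv_altLoop (cs : List Char) : ∀ (toks : List (List Char)) (buf : List Char),
    PySem.Chars.join ['_']
      (if (altLoop cs toks buf).2 ≠ [] then (altLoop cs toks buf).1 ++ [(altLoop cs toks buf).2]
       else (altLoop cs toks buf).1)
    = PySem.Chars.join ['_'] toks ++
      (if buf ≠ [] then (if toks ≠ [] then ['_'] else []) ++ buf ++ pvNf 1 (cs.map pvStep)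
       else pvNf (if toks ≠ [] then 2 else 0) (cs.map pvStep)) := by
  induction cs with
  | nil =>
    intro toks buf
    rw [altLoop]
    by_cases hb : buf = []
    · simp [hb, pvNf]
    · simp only [ne_eq, hb, not_false_eq_true, if_pos, pv_join_concat]
      by_cases ht : toks = [] <;> simp [ht, pvNf]
  | cons c cs ih =>
    intro toks buf
    rw [altLoop]
    by_cases ha : PySem.Chars.isalnum c = true
    · rw [if_pos ha, ih]
      have hs : pvStep c = PySem.Chars.lowerChar c := by rw [pvStep, if_pos ha]
      have hne := pvLower_ne c ha
      rw [List.map_cons, hs]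
      rw [show pvNf 1 (PySem.Chars.lowerChar c :: cs.map pvStep)
            = PySem.Chars.lowerChar c :: pvNf 1 (cs.map pvStep) from by
          rw [pvNf, if_neg hne]; simp]
      by_cases hb : buf = []
      · subst hb
        simp only [ne_eq, List.nil_append, not_true_eq_false]
        by_cases ht : toks = [] <;> simp [ht, pvNf, hne]
      · simp [hb]
    · rw [if_neg ha]
      have hs : pvStep c = '_' := by rw [pvStep, if_neg ha]
      rw [List.map_cons, hs]
      have hnf1 : pvNf 1 ('_' :: cs.map pvStep) = pvNf 2 (cs.map pvStep) := by rw [pvNf]; simp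
      have hnf2 : pvNf 2 ('_' :: cs.map pvStep) = pvNf 2 (cs.map pvStep) := by rw [pvNf]; simp
      have hnf0 : pvNf 0 ('_' :: cs.map pvStep) = pvNf 0 (cs.map pvStep) := by rw [pvNf]; simp
      by_cases hb : buf = []
      · rw [if_neg (show ¬(buf ≠ []) from by simp [hb]), ih]
        by_cases ht : toks = [] <;> simp [ht, hb, hnf0, hnf2]
      · rw [if_pos (show buf ≠ [] from hb), ih, pv_join_concat]
        have hne2 : (toks ++ [buf]) ≠ [] := by simp
        by_cases ht : toks = [] <;> simp [ht, hb, hne2, hnf1]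

-- ===== VERDICT (by name: the statement is the Claim_ definition above) =====
theorem normalize_plugin_id_alias_py_spec : Claim_equal_normalize_plugin_id_alias_py := by
  intro value _
  unfold Spec_normalize_plugin_id_alias_py
  unfold normalize_plugin_id_alias_py normalize_plugin_id_alias_py_alt
  show String.mk (collapseLoopA (PySem.Chars.stripChars (List.map pvStep value.toList) ['_']))
      = String.mk (PySem.Chars.join ['_']
          (if (altLoop value.toList [] []).2 ≠ [] then
            (altLoop value.toList [] []).1 ++ [(altLoop value.toList [] []).2]
          else (altLoop value.toList [] []).1))
  rw [pv_altLoop]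
  simp only [ne_eq, not_true_eq_false, if_false, List.nil_append]
  congr 1
  rw [show PySem.Chars.stripChars (value.toList.map pvStep) ['_']
        = pvRstrip (List.dropWhile (fun c => (['_'] : List Char).contains c)
            (value.toList.map pvStep)) from rfl]
  rw [collapseLoopA_eq_dedup, ← (pvNf_inTok_after _).1, ← pvNf_start]
  simp [PySem.Chars.join, List.intercalate]
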